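-- pv_equiv track=rewrite | github.com/Jongil512/AlgoStudy | 230328/최고의 집합.py | solution
-- ===== SOURCE A (Python) =====
-- def solution(n, s):
--     if n > s:
--         return [-1]
--
--     tmp, remainder = divmod(s, n)
--     answer = [tmp] * n
--     if remainder:
--         for i in range(remainder):
--             answer[i] += 1
--
--     return sorted(answer)
-- ===== SOURCE B (Python) =====
-- def solution(n, s):
--     if n > s:
--         return [-1]
--     out = []
--     while n > 0:
--         x = s // n          # remaining sum spread evenly: floor of the average
--         out.append(x)
--         s -= x
--         n -= 1
--     return out
-- ===== Notes on version B (the rewrite author's own statement) =====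
-- stated objective: alternative
-- what changed: B builds the answer in one greedy pass - repeatedly take floor(remaining sum / remaining slots), subtract, and append - instead of A's divmod, per-index increment loop and final sort.
import Mathlib
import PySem

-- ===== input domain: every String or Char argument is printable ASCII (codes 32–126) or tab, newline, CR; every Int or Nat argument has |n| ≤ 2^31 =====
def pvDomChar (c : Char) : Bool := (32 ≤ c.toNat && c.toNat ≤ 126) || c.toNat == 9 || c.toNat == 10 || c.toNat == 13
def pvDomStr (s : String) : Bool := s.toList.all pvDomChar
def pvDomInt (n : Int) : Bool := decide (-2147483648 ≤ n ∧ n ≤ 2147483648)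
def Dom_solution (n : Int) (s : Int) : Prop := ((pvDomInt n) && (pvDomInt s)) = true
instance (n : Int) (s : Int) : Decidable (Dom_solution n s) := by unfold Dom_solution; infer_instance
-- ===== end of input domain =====

-- B replaces A's divmod + per-index increment + sort by a single greedy pass that
-- repeatedly takes floor(remaining sum / remaining slots) (objective: alternative).

-- ===== PORT A =====
def solution (n : Int) (s : Int) : List Int :=
  if n > s then [-1]
  else
    match PySem.Int.divmod? s n with
    | none => []   -- unreachable: Pre_solution excludes n = 0 here (ZeroDivisionError)
    | some (tmp, remainder) =>
      let answer := List.replicate n.toNat tmp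
      let answer :=
        if remainder ≠ 0 then
          -- for i in range(remainder): answer[i] += 1   (indices are always in range here)
          (PySem.List.pyRange 0 remainder 1).foldl
            (fun acc i => acc.set i.toNat (acc.getD i.toNat 0 + 1)) answer
        else answer
      PySem.List.sorted answer (fun x => x) false

-- ===== PORT B =====
-- the while loop of Source B: while n > 0: x = s // n; out.append(x); s -= x; n -= 1
def solutionAltGo (n : Int) (s : Int) : List Int :=
  if 0 < n then
    PySem.Int.floordiv s n :: solutionAltGo (n - 1) (s - PySem.Int.floordiv s n)
  else []
termination_by n.toNat
decreasing_by omega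

def solution_alt (n : Int) (s : Int) : List Int :=
  if n > s then [-1] else solutionAltGo n s

-- ===== PRECONDITION & SPEC =====
-- Pre_ excludes exactly the inputs where A raises ZeroDivisionError (n = 0 with n ≤ s);
-- B returns [] there, but matching A requires excluding them.
def Pre_solution (n : Int) (s : Int) : Prop := n > s ∨ n ≠ 0
instance (n : Int) (s : Int) : Decidable (Pre_solution n s) := by unfold Pre_solution; infer_instance
def pvWitness_solution : Int × Int := (3, 13)

def Spec_solution (n : Int) (s : Int) (out : List Int) : Prop := out = solution_alt n s
instance (n : Int) (s : Int) (out : List Int) : Decidable (Spec_solution n s out) := by unfold Spec_solution; infer_instance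

-- ===== CLAIM (what is proved, stated in full; the proofs are below) =====
def Claim_equal_solution : Prop := ∀ (n : Int) (s : Int), Dom_solution n s → Pre_solution n s → Spec_solution n s (solution n s)

-- ===== LEMMAS AND PROOFS =====

-- After incrementing indices 0..m-1 of (replicate N q), the list is m copies of q+1 then N-m copies of q.
theorem pv_foldl_incr (q : Int) (N m : Nat) (hm : m ≤ N) :
    (List.range m).foldl
      (fun acc (k : Nat) => acc.set ((0 + (k : Int)).toNat) (acc.getD ((0 + (k : Int)).toNat) 0 + 1))
      (List.replicate N q)
    = List.replicate m (q + 1) ++ List.replicate (N - m) q := by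
  induction m with
  | zero => simp
  | succ m ih =>
    rw [List.range_succ, List.foldl_append, ih (by omega)]
    simp only [List.foldl_cons, List.foldl_nil]
    have hidx : ((0 + (m : Int)).toNat) = m := by omega
    rw [hidx]
    have hget : (List.replicate m (q + 1) ++ List.replicate (N - m) q).getD m 0 = q := by
      rw [List.getD_eq_getElem?_getD, List.getElem?_append_right (by simp)]
      simp [show 0 < N - m by omega]
    rw [hget]
    have hset : (List.replicate m (q + 1) ++ List.replicate (N - m) q).set m (q + 1)
        = List.replicate (m + 1) (q + 1) ++ List.replicate (N - (m + 1)) q := by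
      rw [List.set_append_right _ _ (by simp)]
      simp only [List.length_replicate, Nat.sub_self]
      have : N - m = (N - (m+1)) + 1 := by omega
      rw [this, List.replicate_succ, List.set_cons_zero,
          List.replicate_succ' (n := m), List.append_assoc]
      simp
    rw [hset]

-- sorted of (r copies of q+1 then N-r copies of q) is (N-r copies of q then r copies of q+1)
theorem pv_sorted_blocks (q : Int) (a b : Nat) :
    PySem.List.sorted (List.replicate a (q + 1) ++ List.replicate b q) (fun x => x) false
    = List.replicate b q ++ List.replicate a (q + 1) := by
  apply PySem.List.sorted_id_eq_of_perm_of_pairwise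
  · exact List.perm_append_comm
  · rw [List.pairwise_append]
    refine ⟨List.pairwise_replicate.2 (by simp), List.pairwise_replicate.2 (by simp), ?_⟩
    intro x hx y hy
    rw [List.eq_of_mem_replicate hx, List.eq_of_mem_replicate hy]
    omega

-- floor(s / m) = q when s = q*m + r with 0 ≤ r < m
theorem pv_floordiv_block (q r : Int) (m : Nat) (h0 : 0 ≤ r) (h1 : r < (m : Int)) :
    PySem.Int.floordiv (q * (m : Int) + r) (m : Int) = q := by
  have hm : (0 : Int) < (m : Int) := lt_of_le_of_lt h0 h1
  rw [PySem.Int.floordiv_eq_iff_of_pos hm]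
  constructor
  · omega
  · have : (q + 1) * (m : Int) = q * m + m := by ring
    omega

-- The greedy loop on s = q*m + r (0 ≤ r < m) emits (m - r) copies of q then r copies of q+1.
theorem pv_go_blocks (m : Nat) (q r : Int) (h0 : 0 ≤ r) (h1 : r < (m : Int)) :
    solutionAltGo (m : Int) (q * (m : Int) + r)
    = List.replicate (m - r.toNat) q ++ List.replicate r.toNat (q + 1) := by
  induction m generalizing q r with
  | zero => exact absurd h1 (by omega)
  | succ m ih =>
    rw [solutionAltGo, if_pos (by omega), pv_floordiv_block q r (m + 1) h0 h1]
    have hs : q * ((m + 1 : Nat) : Int) + r - q = q * (m : Int) + r := by push_cast; ring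
    have hn : ((m + 1 : Nat) : Int) - 1 = (m : Int) := by push_cast; ring
    rw [hs, hn]
    by_cases hr : r < (m : Int)
    · rw [ih q r h0 hr]
      have : (m + 1) - r.toNat = ((m - r.toNat) + 1) := by omega
      rw [this, List.replicate_succ]
      rfl
    · -- r = m : remaining sum is (q+1)*m, all remaining slots get q+1
      have hrm : r = (m : Int) := by omega
      have hrt : r.toNat = m := by omega
      subst hrm
      rcases Nat.eq_zero_or_pos m with hm0 | hm0
      · subst hm0
        rw [solutionAltGo, if_neg (by simp)]
        simp
      · have hs2 : q * (m : Int) + (m : Int) = (q + 1) * (m : Int) + 0 := by ring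
        rw [hs2, ih (q + 1) 0 le_rfl (by omega)]
        rw [hrt]
        simp [List.replicate_succ]
    
-- ===== VERDICT (by name: the statement is the Claim_ definition above) =====
theorem solution_spec : Claim_equal_solution := by
  intro n s _ hpre
  unfold Spec_solution solution solution_alt
  by_cases hgt : n > s
  · simp [hgt]
  · simp only [if_neg hgt]
    have hn0 : n ≠ 0 := by unfold Pre_solution at hpre; omega
    simp only [PySem.Int.divmod?, if_neg hn0]
    set q := s.fdiv n with hq
    set r := s.fmod n with hr
    have hqr : q * n + r = s := by
      have := PySem.Int.floordiv_mul_add_mod s n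
      have hf : PySem.Int.floordiv s n = q := rfl
      have hm : PySem.Int.mod s n = r := rfl
      rw [hf, hm] at this
      exact this
    rcases lt_or_gt_of_ne hn0 with hneg | hpos
    · -- n < 0 : A's answer list is empty; B's loop does not run
      have hbd := PySem.Int.mod_neg_bounds s hneg
      have hmr : PySem.Int.mod s n = r := rfl
      have hnt : n.toNat = 0 := by omega
      have hrange : PySem.List.pyRange 0 r 1 = [] := by
        rw [PySem.List.pyRange_one]
        have : (r - 0).toNat = 0 := by omega
        rw [this]; simp
      have hnn : ¬ 0 < n := by omega
      have hgo : solutionAltGo n s = [] := by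
        rw [solutionAltGo, if_neg hnn]
      by_cases hrz : r = 0 <;>
        simp [hrz, hrange, hnt, hgo, PySem.List.sorted]
    · -- n > 0 : q = s // n, r = s % n with 0 ≤ r < n
      have hr0 : 0 ≤ r := PySem.Int.mod_nonneg s hpos
      have hrn : r < n := PySem.Int.mod_lt s hpos
      have key :
          (PySem.List.pyRange 0 r 1).foldl
            (fun acc i => acc.set i.toNat (acc.getD i.toNat 0 + 1))
            (List.replicate n.toNat q)
          = List.replicate r.toNat (q + 1) ++ List.replicate (n.toNat - r.toNat) q := by
        rw [PySem.List.pyRange_one]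
        have h0 : (r - 0).toNat = r.toNat := by omega
        rw [h0, List.foldl_map]
        exact pv_foldl_incr q n.toNat r.toNat (by omega)
      have hgo : solutionAltGo n s
          = List.replicate (n.toNat - r.toNat) q ++ List.replicate r.toNat (q + 1) := by
        have hcast : ((n.toNat : Nat) : Int) = n := by omega
        have hrc : r < ((n.toNat : Nat) : Int) := by omega
        have := pv_go_blocks n.toNat q r hr0 hrc
        rw [hcast, hqr] at this
        exact this
      by_cases hrz : r = 0
      · simp only [hrz, ne_eq, not_true_eq_false, if_false]
        have hp : (List.replicate n.toNat q).Pairwise (fun a b => (fun x : Int => x) a ≤ (fun x => x) b) :=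
          List.pairwise_replicate.2 (by simp)
        rw [PySem.List.sorted_eq_self_of_pairwise _ _ hp]
        rw [hgo]
        simp [hrz]
      · simp only [ne_eq, hrz, not_false_eq_true, if_true, key]
        rw [pv_sorted_blocks, hgo]
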